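-- pv_equiv track=rewrite | github.com/SOMNATH0904/ITER-LAB-Assignments | 5. Fifth_Semester/PYTHON/Minor Assignment 3/Q01.py | top_three_digits
-- ===== SOURCE A (Python) =====
-- def top_three_digits(num):
--     first = second = third = -1
--     while(num > 0):
--         digit = num % 10
--         num //= 10
--
--         if(digit > first):
--             third = second
--             second = first
--             first = digit
--         elif(digit > second):
--             third = second
--             second = digit
--         elif(digit > third):
--             third = digit
--
--     return first, second, third
-- ===== SOURCE B (Python) =====
-- def top_three_digits(num):
--     digits = []
--     while num > 0:
--         digits.append(num % 10)
--         num //= 10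
--     padded = sorted(digits, reverse=True) + [-1, -1, -1]
--     return (padded[0], padded[1], padded[2])
-- ===== Notes on version B (the rewrite author's own statement) =====
-- stated objective: simpler
-- what changed: B materializes the digit list, sorts it descending and reads the first three entries of the sentinel-padded result, replacing A's incremental top-3 branch cascade.
import Mathlib
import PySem

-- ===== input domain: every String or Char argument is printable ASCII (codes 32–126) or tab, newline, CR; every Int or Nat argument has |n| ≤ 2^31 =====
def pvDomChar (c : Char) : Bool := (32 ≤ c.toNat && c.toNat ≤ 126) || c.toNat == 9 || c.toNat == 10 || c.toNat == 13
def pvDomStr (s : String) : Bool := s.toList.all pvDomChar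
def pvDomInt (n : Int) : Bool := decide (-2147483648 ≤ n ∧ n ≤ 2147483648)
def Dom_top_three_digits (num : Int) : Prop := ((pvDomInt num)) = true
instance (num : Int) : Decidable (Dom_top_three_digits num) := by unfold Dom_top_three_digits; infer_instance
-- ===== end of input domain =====

-- B replaces A's incremental top-3 branch cascade by collect-digits, sort descending, pad with sentinels and take the first three (objective: simpler).

-- termination helper for both while-loops (num //= 10 with num > 0)
theorem pvFloordiv10_lt {n : Int} (h : 0 < n) : (PySem.Int.floordiv n 10).toNat < n.toNat := by
  have he : Int.fdiv n 10 = n / 10 := by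
    rw [Int.fdiv_eq_ediv]
    simp
  simp only [PySem.Int.floordiv, he]
  omega

-- ===== PORT A =====
def top_three_digits_go (num first second third : Int) : Int × Int × Int :=
  if 0 < num then
    let digit := PySem.Int.mod num 10
    let num' := PySem.Int.floordiv num 10
    if digit > first then top_three_digits_go num' digit first second
    else if digit > second then top_three_digits_go num' first digit second
    else if digit > third then top_three_digits_go num' first second digit
    else top_three_digits_go num' first second third
  else (first, second, third)
termination_by num.toNat
decreasing_by all_goals exact pvFloordiv10_lt (by assumption)

def top_three_digits (num : Int) : Int × Int × Int :=
  top_three_digits_go num (-1) (-1) (-1)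

-- ===== PORT B =====
def pvDigitsLoop (num : Int) (digits : List Int) : List Int :=
  if 0 < num then
    pvDigitsLoop (PySem.Int.floordiv num 10) (digits ++ [PySem.Int.mod num 10])
  else digits
termination_by num.toNat
decreasing_by exact pvFloordiv10_lt (by assumption)

def top_three_digits_alt (num : Int) : Int × Int × Int :=
  let digits := pvDigitsLoop num []
  let padded := PySem.List.sorted digits (fun x => x) true ++ [-1, -1, -1]
  -- padded has length ≥ 3, so Python's padded[0], padded[1], padded[2] are in range; the .getD default is never taken
  ((PySem.List.pyGet? padded 0).getD 0, (PySem.List.pyGet? padded 1).getD 0, (PySem.List.pyGet? padded 2).getD 0)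

-- ===== PRECONDITION & SPEC =====
def Spec_top_three_digits (num : Int) (out : Int × Int × Int) : Prop := out = top_three_digits_alt num
instance (num : Int) (out : Int × Int × Int) : Decidable (Spec_top_three_digits num out) := by unfold Spec_top_three_digits; infer_instance

-- ===== CLAIM (what is proved, stated in full; the proofs are below) =====
def Claim_equal_top_three_digits : Prop := ∀ (num : Int), Dom_top_three_digits num → Spec_top_three_digits num (top_three_digits num)

-- ===== LEMMAS AND PROOFS =====

-- A's loop body as one step on the (first, second, third) state
def pvStep (digit : Int) (st : Int × Int × Int) : Int × Int × Int :=
  match st with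
  | (first, second, third) =>
    if digit > first then (digit, first, second)
    else if digit > second then (first, digit, second)
    else if digit > third then (first, second, digit)
    else (first, second, third)

-- first three entries of a list, padded with -1
def pvFirst3 (m : List Int) : Int × Int × Int :=
  match m with
  | [] => (-1, -1, -1)
  | [a] => (a, -1, -1)
  | [a, b] => (a, b, -1)
  | a :: b :: c :: _ => (a, b, c)

def pvIns (x : Int) (acc : List Int) : List Int :=
  PySem.List.insertBy (fun a b => decide (b < a)) x acc

theorem pvDigitsLoop_stop {num : Int} (h0 : ¬ 0 < num) (acc : List Int) :
    pvDigitsLoop num acc = acc := by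
  rw [pvDigitsLoop]; simp [h0]

theorem pv_dl (k : Nat) : ∀ (num : Int), num.toNat ≤ k → ∀ acc,
    pvDigitsLoop num acc = acc ++ pvDigitsLoop num [] := by
  induction k with
  | zero =>
    intro num h acc
    have h0 : ¬ 0 < num := by omega
    rw [pvDigitsLoop_stop h0, pvDigitsLoop_stop h0]
    simp
  | succ k ih =>
    intro num h acc
    by_cases h0 : 0 < num
    · have hb : (PySem.Int.floordiv num 10).toNat ≤ k := by
        have := pvFloordiv10_lt h0; omega
      rw [pvDigitsLoop]
      conv_rhs => rw [pvDigitsLoop]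
      simp only [h0, if_pos]
      rw [ih _ hb (acc ++ [PySem.Int.mod num 10]), ih _ hb ([] ++ [PySem.Int.mod num 10])]
      simp
    · rw [pvDigitsLoop_stop h0, pvDigitsLoop_stop h0]; simp

theorem pv_digits_nonneg (k : Nat) : ∀ (num : Int), num.toNat ≤ k →
    ∀ x ∈ pvDigitsLoop num [], 0 ≤ x := by
  induction k with
  | zero =>
    intro num h x hx
    have h0 : ¬ 0 < num := by omega
    rw [pvDigitsLoop_stop h0] at hx
    simp at hx
  | succ k ih =>
    intro num h x hx
    by_cases h0 : 0 < num
    · have hb : (PySem.Int.floordiv num 10).toNat ≤ k := by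
        have := pvFloordiv10_lt h0; omega
      rw [pvDigitsLoop] at hx
      simp only [h0, if_pos] at hx
      rw [pv_dl k _ hb] at hx
      simp only [List.nil_append, List.mem_append, List.mem_singleton] at hx
      rcases hx with hx | hx
      · subst hx
        rw [PySem.Int.mod_eq_emod_of_pos (by omega : (0:Int) < 10)]
        omega
      · exact ih _ hb x hx
    · rw [pvDigitsLoop_stop h0] at hx; simp at hx

theorem pv_go (k : Nat) : ∀ (num : Int), num.toNat ≤ k → ∀ f s t,
    top_three_digits_go num f s t =
      List.foldl (fun st d => pvStep d st) (f, s, t) (pvDigitsLoop num []) := by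
  induction k with
  | zero =>
    intro num h f s t
    have h0 : ¬ 0 < num := by omega
    rw [top_three_digits_go, pvDigitsLoop_stop h0]
    simp [h0]
  | succ k ih =>
    intro num h f s t
    by_cases h0 : 0 < num
    · have hb : (PySem.Int.floordiv num 10).toNat ≤ k := by
        have := pvFloordiv10_lt h0; omega
      rw [top_three_digits_go]
      conv_rhs => rw [pvDigitsLoop]
      simp only [h0, if_pos]
      rw [pv_dl k _ hb ([] ++ [PySem.Int.mod num 10])]
      simp only [List.nil_append, List.singleton_append, List.foldl_cons, pvStep]
      split_ifs with h1 h2 h3 <;> exact ih _ hb _ _ _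
    · rw [top_three_digits_go, pvDigitsLoop_stop h0]
      simp [h0]

theorem pvK (d : Int) (hd : 0 ≤ d) (m : List Int) :
    pvFirst3 (pvIns d m) = pvStep d (pvFirst3 m) := by
  match m with
  | [] =>
    simp only [pvIns, PySem.List.insertBy, pvFirst3, pvStep]
    split_ifs <;> first | rfl | omega | (simp_all [Prod.mk.injEq] <;> omega)
  | [a] =>
    simp only [pvIns, PySem.List.insertBy, pvFirst3, pvStep]
    split_ifs <;> first | rfl | omega | (simp_all [Prod.mk.injEq] <;> omega)
  | [a, b] =>
    simp only [pvIns, PySem.List.insertBy, pvFirst3, pvStep]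
    split_ifs <;> first | rfl | omega | (simp_all [Prod.mk.injEq] <;> omega)
  | a :: b :: c :: rest =>
    simp only [pvIns, PySem.List.insertBy, pvFirst3, pvStep]
    split_ifs <;> first | rfl | omega | (simp_all [Prod.mk.injEq] <;> omega)

theorem pv_main (l : List Int) (hl : ∀ x ∈ l, 0 ≤ x) : ∀ acc,
    List.foldl (fun st d => pvStep d st) (pvFirst3 acc) l =
      pvFirst3 (List.foldl (fun acc x => pvIns x acc) acc l) := by
  induction l with
  | nil => intro acc; rfl
  | cons d l ih =>
    intro acc
    have hd : 0 ≤ d := hl d (by simp)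
    simp only [List.foldl_cons]
    rw [← pvK d hd acc, ih (fun x hx => hl x (by simp [hx]))]

theorem pv_first3_pad (m : List Int) :
    ((PySem.List.pyGet? (m ++ [-1, -1, -1]) 0).getD 0,
     (PySem.List.pyGet? (m ++ [-1, -1, -1]) 1).getD 0,
     (PySem.List.pyGet? (m ++ [-1, -1, -1]) 2).getD 0) = pvFirst3 m := by
  match m with
  | [] => rfl
  | [a] => rfl
  | [a, b] => rfl
  | a :: b :: c :: rest =>
    have h1 : (0:Int) ≤ (rest.length:Int) + 3 + 1 + 1 := by omega
    have h2 : (0:Int) ≤ (rest.length:Int) + 3 + 1 := by omega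
    have h3 : (2:Int) ≤ (rest.length:Int) + 3 + 1 + 1 := by omega
    simp [PySem.List.pyGet?, PySem.List.pyIdx?, pvFirst3, h1, h2, h3]

-- ===== VERDICT (by name: the statement is the Claim_ definition above) =====
theorem top_three_digits_spec : Claim_equal_top_three_digits := by
  intro num _
  unfold Spec_top_three_digits
  have halt : top_three_digits_alt num
      = pvFirst3 (PySem.List.sorted (pvDigitsLoop num []) (fun x => x) true) :=
    pv_first3_pad _
  rw [halt, PySem.List.sorted_rev_eq_foldl_insertBy]
  rw [top_three_digits, pv_go num.toNat num le_rfl]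
  exact pv_main (pvDigitsLoop num []) (pv_digits_nonneg num.toNat num le_rfl) []
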